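-- pv_equiv track=rewrite | github.com/jmk1067/SalemTileStitcher | SalemTileSticher.py | ListDividerTwo
-- ===== SOURCE A (Python) =====
-- def ListDividerTwo(List): # Divides lists into 2 parts.
--     List.sort()
--     ListA = []
--     ListB = []
--     for Number in List:
--         if Number < 376:
--             ListA.append(Number) # Adds the X to the XList.
--         else:
--             ListB.append(Number)
--     return(ListA, ListB)
-- ===== SOURCE B (Python) =====
-- def ListDividerTwo(List):  # Divides lists into 2 parts.
--     List.sort()
--     lo, hi = 0, len(List)
--     while lo < hi:  # binary search for the first index with value >= 376
--         mid = (lo + hi) // 2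
--         if List[mid] < 376:
--             lo = mid + 1
--         else:
--             hi = mid
--     return (List[:lo], List[lo:])
-- ===== Notes on version B (the rewrite author's own statement) =====
-- stated objective: alternative
-- what changed: After the same in-place sort, B finds the split point with a hand-written binary search and returns two slices, instead of scanning every element and appending it to one of two accumulator lists.
import Mathlib
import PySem

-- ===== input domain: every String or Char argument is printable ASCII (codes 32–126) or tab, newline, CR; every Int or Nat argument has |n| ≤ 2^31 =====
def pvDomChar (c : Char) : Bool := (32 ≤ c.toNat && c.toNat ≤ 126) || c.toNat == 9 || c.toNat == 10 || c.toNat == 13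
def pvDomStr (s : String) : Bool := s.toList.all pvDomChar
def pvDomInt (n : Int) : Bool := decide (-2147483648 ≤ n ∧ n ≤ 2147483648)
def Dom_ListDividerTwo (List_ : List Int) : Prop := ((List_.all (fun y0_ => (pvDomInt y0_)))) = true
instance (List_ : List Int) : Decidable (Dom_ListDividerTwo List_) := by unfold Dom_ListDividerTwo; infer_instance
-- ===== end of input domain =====

-- B replaces A's element-by-element scan (after the same sort) by a binary search for the
-- split index plus two slices; equivalence is about the RETURN value (both Pythons sort the
-- argument in place identically).

-- ===== PORT A =====
def ListDividerTwo (List_ : List Int) : List Int × List Int :=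
  let s := PySem.List.sorted List_ (fun x => x) false   -- List.sort()
  s.foldl (fun acc n =>
      if n < 376 then (acc.1 ++ [n], acc.2) else (acc.1, acc.2 ++ [n]))
    ([], [])

-- ===== PORT B =====
-- the while-loop of Source B; List_[mid] is exact as getD since lo < hi ≤ length keeps mid in range
def bsLoop (xs : List Int) (lo hi : Nat) : Nat :=
  if lo < hi then
    let mid := (lo + hi) / 2
    if xs.getD mid 0 < 376 then bsLoop xs (mid + 1) hi else bsLoop xs lo mid
  else lo
termination_by hi - lo
decreasing_by all_goals omega

def ListDividerTwo_alt (List_ : List Int) : List Int × List Int :=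
  let s := PySem.List.sorted List_ (fun x => x) false   -- List.sort()
  let lo := bsLoop s 0 s.length
  (PySem.List.slice s none (some (lo : Int)), PySem.List.slice s (some (lo : Int)) none)

-- ===== PRECONDITION & SPEC =====
def Spec_ListDividerTwo (List_ : List Int) (out : List Int × List Int) : Prop := out = ListDividerTwo_alt List_
instance (List_ : List Int) (out : List Int × List Int) : Decidable (Spec_ListDividerTwo List_ out) := by unfold Spec_ListDividerTwo; infer_instance

-- ===== CLAIM (what is proved, stated in full; the proofs are below) =====
def Claim_equal_ListDividerTwo : Prop := ∀ (List_ : List Int), Dom_ListDividerTwo List_ → Spec_ListDividerTwo List_ (ListDividerTwo List_)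

-- ===== LEMMAS AND PROOFS =====

-- A's loop is the pair (filter (< 376), filter (not < 376)), by accumulator generalization.
theorem foldl_split (s : List Int) (a b : List Int) :
    s.foldl (fun acc n =>
        if n < 376 then (acc.1 ++ [n], acc.2) else (acc.1, acc.2 ++ [n])) (a, b)
      = (a ++ s.filter (fun n => n < 376), b ++ s.filter (fun n => ¬ n < 376)) := by
  induction s generalizing a b with
  | nil => simp
  | cons x t ih =>
    by_cases hx : x < 376
    · simp [hx, ih, List.append_assoc]
    · simp [hx, ih, List.append_assoc, not_lt.mp hx]

-- The binary search lands at a split point: everything left of it is < 376,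
-- everything from it on is ≥ 376 (needs the list sorted).
theorem bsLoop_split (s : List Int)
    (hmono : ∀ (p q : Nat) (_ : p ≤ q) (hq : q < s.length), s[p]'(by omega) ≤ s[q]) :
    ∀ (lo hi : Nat), hi ≤ s.length →
    (∀ j (hj : j < s.length), j < lo → s[j] < 376) →
    (∀ j (hj : j < s.length), hi ≤ j → 376 ≤ s[j]) →
    (∀ j (hj : j < s.length), j < bsLoop s lo hi → s[j] < 376) ∧
    (∀ j (hj : j < s.length), bsLoop s lo hi ≤ j → 376 ≤ s[j]) := by
  intro lo hi
  induction hlh : hi - lo using Nat.strong_induction_on generalizing lo hi with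
  | _ n ih =>
    intro hhi hlow hhigh
    rw [bsLoop]
    by_cases h : lo < hi
    · simp only [h, if_true]
      have hmid : (lo + hi) / 2 < s.length := by omega
      have hget : s.getD ((lo + hi) / 2) 0 = s[(lo + hi) / 2] := by
        simp [List.getD_eq_getElem?_getD, List.getElem?_eq_getElem hmid]
      by_cases hv : s[(lo + hi) / 2] < 376
      · simp only [hget, hv, if_true]
        exact ih (hi - ((lo + hi) / 2 + 1)) (by omega) _ _ (by omega) hhi
          (fun j hj hjlt => lt_of_le_of_lt (hmono j ((lo + hi) / 2) (by omega) hmid) hv)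
          hhigh
      · simp only [hget, hv, if_false]
        exact ih ((lo + hi) / 2 - lo) (by omega) _ _ (by omega) (by omega) hlow
          (fun j hj hjge => le_trans (not_lt.mp hv) (hmono ((lo + hi) / 2) j hjge hj))
    · simp only [h, if_false]
      exact ⟨hlow, fun j hj hjk => hhigh j hj (by omega)⟩

theorem filter_lt_eq_take (s : List Int) (k : Nat)
    (hlow : ∀ j (hj : j < s.length), j < k → s[j] < 376)
    (hhigh : ∀ j (hj : j < s.length), k ≤ j → 376 ≤ s[j]) :
    s.filter (fun n => decide (n < 376)) = s.take k ∧
    s.filter (fun n => decide (376 ≤ n)) = s.drop k := by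
  constructor
  · rw [show s.filter (fun n => decide (n < 376))
        = (s.take k ++ s.drop k).filter (fun n => decide (n < 376)) by rw [List.take_append_drop]]
    rw [List.filter_append]
    have h1 : (s.take k).filter (fun n => decide (n < 376)) = s.take k := by
      apply List.filter_eq_self.mpr
      intro a ha
      obtain ⟨j, hj, rfl⟩ := List.mem_iff_getElem.mp ha
      have hjlen : j < s.length := by
        have := hj; simp [List.length_take] at this; omega
      have : (s.take k)[j] = s[j]'hjlen := List.getElem_take
      rw [this]
      have hjk : j < k := by have := hj; simp [List.length_take] at this; omega
      simpa using hlow j hjlen hjk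
    have h2 : (s.drop k).filter (fun n => decide (n < 376)) = [] := by
      apply List.filter_eq_nil_iff.mpr
      intro a ha
      obtain ⟨j, hj, rfl⟩ := List.mem_iff_getElem.mp ha
      have hjlen : k + j < s.length := by have := hj; simp at this; omega
      have : (s.drop k)[j] = s[k + j]'hjlen := List.getElem_drop
      rw [this]
      simpa using hhigh (k + j) hjlen (by omega)
    rw [h1, h2, List.append_nil]
  · rw [show s.filter (fun n => decide (376 ≤ n))
        = (s.take k ++ s.drop k).filter (fun n => decide (376 ≤ n)) by rw [List.take_append_drop]]
    rw [List.filter_append]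
    have h1 : (s.take k).filter (fun n => decide (376 ≤ n)) = [] := by
      apply List.filter_eq_nil_iff.mpr
      intro a ha
      obtain ⟨j, hj, rfl⟩ := List.mem_iff_getElem.mp ha
      have hjlen : j < s.length := by have := hj; simp [List.length_take] at this; omega
      have hjk : j < k := by have := hj; simp [List.length_take] at this; omega
      have : (s.take k)[j] = s[j]'hjlen := List.getElem_take
      rw [this]
      simpa [not_le] using hlow j hjlen hjk
    have h2 : (s.drop k).filter (fun n => decide (376 ≤ n)) = s.drop k := by
      apply List.filter_eq_self.mpr
      intro a ha
      obtain ⟨j, hj, rfl⟩ := List.mem_iff_getElem.mp ha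
      have hjlen : k + j < s.length := by have := hj; simp at this; omega
      have : (s.drop k)[j] = s[k + j]'hjlen := List.getElem_drop
      rw [this]
      simpa using hhigh (k + j) hjlen (by omega)
    rw [h1, h2, List.nil_append]

-- ===== VERDICT (by name: the statement is the Claim_ definition above) =====
theorem ListDividerTwo_spec : Claim_equal_ListDividerTwo := by
  intro List_ _
  unfold Spec_ListDividerTwo ListDividerTwo ListDividerTwo_alt
  set s := PySem.List.sorted List_ (fun x => x) false with hs
  have hpair : s.Pairwise (fun a b => a ≤ b) := by
    simpa using PySem.List.sorted_pairwise List_ (fun x => x)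
  have hmono : ∀ (p q : Nat) (_ : p ≤ q) (hq : q < s.length), s[p]'(by omega) ≤ s[q] := by
    intro p q hpq hq
    rcases Nat.eq_or_lt_of_le hpq with rfl | hlt
    · exact le_refl _
    · exact List.pairwise_iff_getElem.mp hpair p q (by omega) hq hlt
  obtain ⟨hlow, hhigh⟩ := bsLoop_split s hmono 0 s.length (le_refl _)
    (fun j hj h => by omega) (fun j hj h => by omega)
  obtain ⟨h1, h2⟩ := filter_lt_eq_take s (bsLoop s 0 s.length) hlow hhigh
  rw [foldl_split s [] []]
  simp only [List.nil_append]
  rw [PySem.List.slice_to_natCast, PySem.List.slice_from_natCast]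
  exact Prod.ext (by simpa using h1) (by simpa using h2)
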